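-- pv_equiv track=rewrite | github.com/aharris2404/project_euler_python | euler54.py | check_copies
-- ===== SOURCE A (Python) =====
-- def check_copies(hand): #checks if a hand has any pairs, three of a kind, two pair, etc. and sorts it accordingly
--     config = []
--     hand.sort()
--
--     i = 0
--     while i < 5:
--         count = 1
--         j = 1
--
--         while i + j < 5 and (hand[i + j] // 10) == (hand[i] // 10):
--             count += 1
--             j += 1
--
--         config.append([count, hand[i] // 10])
--         i += j
--
--     if config != []: #sorts for comparison
--         config.sort()
--
--         for i in range(len(config)):
--
--             for j in range(5):
--
--                 if (hand[j] // 10) == config[i][1]: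
--                     hand.insert(0, hand[j])
--                     hand.pop(j + 1)
--
--     return hand, config[-2][0], config[-1][0]
-- ===== SOURCE B (Python) =====
-- def check_copies(hand):
--     hand.sort()
--     counts = {}
--     for j in range(5):
--         r = hand[j] // 10
--         counts[r] = counts.get(r, 0) + 1
--     config = sorted([cnt, r] for r, cnt in counts.items())
--     hand[:5] = sorted(hand[:5], key=lambda c: (counts[c // 10], c), reverse=True)
--     return hand, config[-2][0], config[-1][0]
-- ===== Notes on version B (the rewrite author's own statement) =====
-- stated objective: simpler
-- what changed: Replaces A's index-based run-scan over the sorted hand with a dict of rank counts, and replaces A's quadratic insert(0)/pop reshuffle loop over config with a single in-place sort of the first five cards by key (count, card) descending.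
import Mathlib
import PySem

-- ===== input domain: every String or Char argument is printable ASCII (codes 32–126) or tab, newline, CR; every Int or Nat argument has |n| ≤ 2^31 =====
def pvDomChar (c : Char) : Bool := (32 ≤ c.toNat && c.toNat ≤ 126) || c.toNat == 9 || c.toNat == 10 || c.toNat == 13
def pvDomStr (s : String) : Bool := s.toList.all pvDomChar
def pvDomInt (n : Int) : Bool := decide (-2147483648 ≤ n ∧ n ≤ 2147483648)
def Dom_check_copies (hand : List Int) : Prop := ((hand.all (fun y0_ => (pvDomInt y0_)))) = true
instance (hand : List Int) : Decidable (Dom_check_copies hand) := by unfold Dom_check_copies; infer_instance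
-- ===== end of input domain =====

-- B replaces A's index-based run scan with a rank-count dict and A's insert(0)/pop reshuffle
-- loops with one descending key sort of the first five cards (objective: simpler).
-- Both A and B sort/mutate the caller's list in place; the equivalence proved here is about the return value.

-- ===== PORT A =====
-- hand[i] (indices are in range on every access made under Pre_)
def ccGet (xs : List Int) (i : Int) : Int := PySem.List.pyGetD xs i 0

-- the inner 'while i + j < 5 and hand[i+j]//10 == hand[i]//10' loop (fuel 5 bounds the ≤ 4 steps)
def ccInner (s : List Int) (i : Nat) (j : Nat) (count : Int) : Nat → Int × Nat
  | 0 => (count, j)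
  | fuel+1 =>
    if i + j < 5 ∧ PySem.Int.floordiv (ccGet s (↑(i + j))) 10 = PySem.Int.floordiv (ccGet s (↑i)) 10
    then ccInner s i (j+1) (count+1) fuel
    else (count, j)

-- the outer 'while i < 5' loop (i grows by j ≥ 1 each pass, so fuel 5 suffices)
def ccOuter (s : List Int) (i : Nat) (config : List (Int × Int)) : Nat → List (Int × Int)
  | 0 => config
  | fuel+1 =>
    if i < 5 then
      let cj := ccInner s i 1 1 5
      ccOuter s (i + cj.2) (config ++ [(cj.1, PySem.Int.floordiv (ccGet s (↑i)) 10)]) fuel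
    else config

-- one pass of 'for j in range(5): if hand[j]//10 == r: hand.insert(0, hand[j]); hand.pop(j+1)'
def ccMove (h0 : List Int) (r : Int) : List Int :=
  (PySem.List.pyRange 0 5 1).foldl (fun h j =>
    if PySem.Int.floordiv (ccGet h j) 10 = r then
      (((PySem.List.pop? (PySem.List.insert h 0 (ccGet h j)) (j+1)).map Prod.snd).getD h)
    else h) h0

def check_copies (hand : List Int) : List Int × Int × Int :=
  let s := PySem.List.sorted hand (fun x => x) false
  let config := ccOuter s 0 [] 5
  if config ≠ [] then
    let config2 := PySem.List.sorted config (fun p => toLex p) false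
    let h2 := config2.foldl (fun h g => ccMove h g.2) s
    (h2, (PySem.List.pyGetD config2 (-2) (0,0)).1, (PySem.List.pyGetD config2 (-1) (0,0)).1)
  else (s, (PySem.List.pyGetD config (-2) (0,0)).1, (PySem.List.pyGetD config (-1) (0,0)).1)

-- ===== PORT B =====
def check_copies_alt (hand : List Int) : List Int × Int × Int :=
  let s := PySem.List.sorted hand (fun x => x) false
  let counts := (PySem.List.pyRange 0 5 1).foldl (fun d j =>
    PySem.Dict.insert d (PySem.Int.floordiv (PySem.List.pyGetD s j 0) 10)
      (PySem.Dict.getD d (PySem.Int.floordiv (PySem.List.pyGetD s j 0) 10) 0 + 1)) PySem.Dict.empty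
  let pre5 := PySem.List.slice s none (some 5)
  let config := PySem.List.sorted ((PySem.Dict.items counts).map (fun rc => (rc.2, rc.1))) (fun p => toLex p) false
  let newPre := PySem.List.sorted pre5 (fun c => toLex (PySem.Dict.getD counts (PySem.Int.floordiv c 10) 0, c)) true
  (newPre ++ PySem.List.slice s (some 5) none,
   (PySem.List.pyGetD config (-2) (0,0)).1, (PySem.List.pyGetD config (-1) (0,0)).1)

-- ===== PRECONDITION & SPEC =====
-- Pre_ is exactly where the Python A returns: at least 5 cards (A hard-codes indices up to 4,
-- IndexError otherwise) and at least two distinct ranks among the 5 smallest cards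
-- (otherwise config has a single entry and config[-2] raises IndexError).
def Pre_check_copies (hand : List Int) : Prop :=
  5 ≤ hand.length ∧
  2 ≤ (PySem.List.dedup (((PySem.List.sorted hand (fun x => x) false).take 5).map
        (fun c => PySem.Int.floordiv c 10))).length
instance (hand : List Int) : Decidable (Pre_check_copies hand) := by unfold Pre_check_copies; infer_instance

def pvWitness_check_copies : List Int := [11, 12, 21, 22, 31]

def Spec_check_copies (hand : List Int) (out : List Int × Int × Int) : Prop := out = check_copies_alt hand
instance (hand : List Int) (out : List Int × Int × Int) : Decidable (Spec_check_copies hand out) := by unfold Spec_check_copies; infer_instance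

-- ===== CLAIM (what is proved, stated in full; the proofs are below) =====
def Claim_equal_check_copies : Prop := ∀ (hand : List Int), Dom_check_copies hand → Pre_check_copies hand → Spec_check_copies hand (check_copies hand)

-- ===== LEMMAS AND PROOFS =====

def pvRank (x : Int) : Int := PySem.Int.floordiv x 10

lemma pvRank_mono {x y : Int} (h : x ≤ y) : pvRank x ≤ pvRank y := by
  unfold pvRank
  rw [PySem.Int.floordiv_eq_ediv_of_pos (by norm_num), PySem.Int.floordiv_eq_ediv_of_pos (by norm_num)]
  exact Int.ediv_le_ediv (by norm_num) h

lemma pv_dropT (s : List Int) (k : Nat) (hk : k < 5) (hs : 5 ≤ s.length) :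
    (s.take 5).drop k = s.getD k 0 :: (s.take 5).drop (k+1) := by
  have hk5 : k < (s.take 5).length := by simp [List.length_take]; omega
  rw [List.drop_eq_getElem_cons hk5]
  congr 1
  rw [List.getElem_take]
  rw [List.getD_eq_getElem s 0 (by omega)]

lemma pv_inner (fuel : Nat) (s : List Int) (i j : Nat) (c : Int)
    (hs : 5 ≤ s.length) (hi : i < 5) (hj : 0 < j) (hf : 5 - (i + j) ≤ fuel) :
    ccInner s i j c fuel =
      (c + ((((s.take 5).drop (i+j)).takeWhile (fun y => decide (pvRank y = pvRank (s.getD i 0)))).length : Int),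
       j + (((s.take 5).drop (i+j)).takeWhile (fun y => decide (pvRank y = pvRank (s.getD i 0)))).length) := by
  induction fuel generalizing j c with
  | zero =>
    have h5 : i + j = 5 ∨ 5 < i + j := by omega
    have hdrop : (s.take 5).drop (i+j) = [] := by
      apply List.drop_eq_nil_of_le; simp [List.length_take]; omega
    rw [hdrop]
    simp [ccInner]
  | succ fuel ih =>
    rw [ccInner]
    by_cases hlt : i + j < 5
    · rw [pv_dropT s (i+j) hlt hs]
      have hget : ∀ m : Nat, ccGet s (↑m) = s.getD m 0 := by
        intro m; simp [ccGet, PySem.List.pyGetD_natCast]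
      by_cases heq : pvRank (s.getD (i+j) 0) = pvRank (s.getD i 0)
      · rw [if_pos ⟨hlt, by rw [hget, hget]; exact heq⟩]
        rw [List.takeWhile_cons_of_pos (by simpa using heq)]
        rw [ih (j+1) (c+1) (by omega) (by omega)]
        have : i + (j + 1) = i + j + 1 := by omega
        rw [this]
        simp only [List.length_cons, Prod.mk.injEq]
        constructor
        · push_cast; ring
        · omega
      · rw [if_neg (by rw [hget, hget]; tauto)]
        rw [List.takeWhile_cons_of_neg (by simpa using heq)]
        simp
    · rw [if_neg (by tauto)]
      have hdrop : (s.take 5).drop (i+j) = [] := by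
        apply List.drop_eq_nil_of_le; simp [List.length_take]; omega
      rw [hdrop]; simp

def pvRLE (v : List Int) : List (Int × Int) :=
  match v with
  | [] => []
  | x :: rest =>
    (1 + ((rest.takeWhile (fun y => decide (pvRank y = pvRank x))).length : Int), pvRank x)
      :: pvRLE (rest.dropWhile (fun y => decide (pvRank y = pvRank x)))
termination_by v.length
decreasing_by simp only [List.length_cons]; exact Nat.lt_succ_of_le (List.length_dropWhile_le _ _)

lemma pv_dropWhile_eq_drop (p : Int → Bool) (l : List Int) :
    l.dropWhile p = l.drop (l.takeWhile p).length := by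
  calc l.dropWhile p = (l.takeWhile p ++ l.dropWhile p).drop (l.takeWhile p).length := by
        rw [List.drop_left]
    _ = l.drop (l.takeWhile p).length := by rw [List.takeWhile_append_dropWhile]

lemma pv_outer (fuel : Nat) (s : List Int) (i : Nat) (acc : List (Int × Int))
    (hs : 5 ≤ s.length) (hf : 5 - i ≤ fuel) :
    ccOuter s i acc fuel = acc ++ pvRLE ((s.take 5).drop i) := by
  induction fuel generalizing i acc with
  | zero =>
    have : (s.take 5).drop i = [] := by
      apply List.drop_eq_nil_of_le; simp [List.length_take]; omega
    rw [this, ccOuter]; simp [pvRLE]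
  | succ fuel ih =>
    rw [ccOuter]
    by_cases hi : i < 5
    · rw [if_pos hi]
      simp only
      rw [pv_inner 5 s i 1 1 hs hi (by omega) (by omega)]
      simp only
      set w := (((s.take 5).drop (i+1)).takeWhile (fun y => decide (pvRank y = pvRank (s.getD i 0)))).length with hw
      rw [ih (i + (1 + w)) _ (by omega)]
      rw [pv_dropT s i hi hs]
      rw [pvRLE]
      have hget : ccGet s (↑i) = s.getD i 0 := by simp [ccGet, PySem.List.pyGetD_natCast]
      rw [hget]
      rw [pv_dropWhile_eq_drop]
      rw [← hw]
      have hdd : (s.take 5).drop (i + (1 + w)) = ((s.take 5).drop (i+1)).drop w := by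
        rw [List.drop_drop]; congr 1; omega
      rw [hdd]
      simp [pvRank]
    · rw [if_neg hi]
      have : (s.take 5).drop i = [] := by
        apply List.drop_eq_nil_of_le; simp [List.length_take]; omega
      rw [this]; simp [pvRLE]

lemma pv_SD (l₁ l₂ : List Int) (x : Int) (h1 : ∀ y ∈ l₁, y = x) (h2 : x ∉ l₂) :
    (PySem.Set.ofList (l₁ ++ l₂)).filter (fun y => y != x) = PySem.Set.ofList l₂ := by
  induction l₁ with
  | nil =>
    simp only [List.nil_append]
    apply List.filter_eq_self.mpr
    intro a ha
    have : a ∈ l₂ := (PySem.Set.mem_ofList _ _).mp ha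
    simp; rintro rfl; exact h2 this
  | cons y l₁ ih =>
    have hyx : y = x := h1 y (by simp)
    subst hyx
    rw [List.cons_append, PySem.Set.ofList_cons]
    have hdisc : ∀ (s : List Int), PySem.Set.discard s y = s.filter (fun z => z != y) := fun _ => rfl
    rw [hdisc]
    rw [List.filter_cons_of_neg (by simp)]
    rw [List.filter_filter]
    simp only [Bool.and_self]
    exact ih (fun z hz => h1 z (by simp [hz]))

lemma pv_rle (v : List Int) (hp : (v.map pvRank).Pairwise (· ≤ ·)) :
    pvRLE v = (PySem.List.dedup (v.map pvRank)).map (fun r => (((v.map pvRank).count r : Int), r)) := by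
  induction v using pvRLE.induct with
  | case1 => simp [pvRLE]
  | case2 x rest ih =>
    set P : Int → Bool := fun y => decide (pvRank y = pvRank x) with hP
    set a := rest.takeWhile P with ha
    set b := rest.dropWhile P with hb
    have hrest : rest = a ++ b := (List.takeWhile_append_dropWhile).symm
    obtain ⟨hhead, htail⟩ : (∀ y ∈ rest, pvRank x ≤ pvRank y) ∧ (rest.map pvRank).Pairwise (· ≤ ·) := by
      simpa using hp
    have hmema : ∀ y ∈ a, pvRank y = pvRank x := by
      intro y hy
      have := List.mem_takeWhile_imp hy
      simpa [hP] using this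
    have hmemb : ∀ y ∈ b, pvRank x < pvRank y := by
      intro y hy
      match hbb : b with
      | [] => simp at hy
      | z :: b' =>
        have hz : ¬ (P z = true) := by
          have := List.head?_dropWhile_not P rest
          rw [← hb] at this; simpa using this
        have hzx : pvRank z ≠ pvRank x := by simpa [hP] using hz
        have hxz : pvRank x < pvRank z :=
          lt_of_le_of_ne (hhead z (by rw [hrest]; simp)) (Ne.symm hzx)
        rcases List.mem_cons.mp hy with rfl | hy'
        · exact hxz
        · have hzy : pvRank z ≤ pvRank y := by
            rw [hrest] at htail
            simp only [List.map_append, List.map_cons] at htail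
            have h1 := (List.pairwise_append.mp htail).2.1
            exact (List.pairwise_cons.mp h1).1 _ (List.mem_map.mpr ⟨y, hy', rfl⟩)
          omega
    have hxb : pvRank x ∉ b.map pvRank := by
      intro hmem
      obtain ⟨y, hy, hyx⟩ := List.mem_map.mp hmem
      have := hmemb y hy; omega
    have hdd : PySem.List.dedup ((x :: rest).map pvRank) = pvRank x :: PySem.List.dedup (b.map pvRank) := by
      rw [hrest]
      simp only [List.map_cons, List.map_append]
      rw [PySem.List.dedup_eq_ofList, PySem.Set.ofList_cons]
      have hdisc : ∀ (s : List Int), PySem.Set.discard s (pvRank x) = s.filter (fun z => z != pvRank x) :=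
        fun _ => rfl
      rw [hdisc, pv_SD (a.map pvRank) (b.map pvRank) (pvRank x) (by
        intro y hy; obtain ⟨z, hz, rfl⟩ := List.mem_map.mp hy; exact hmema z hz) hxb]
      simp
    -- counts
    have hcx : ((x :: rest).map pvRank).count (pvRank x) = 1 + a.length := by
      rw [hrest]
      simp only [List.map_cons, List.map_append, List.count_cons_self, List.count_append]
      have h1 : (a.map pvRank).count (pvRank x) = a.length := by
        rw [List.count_eq_length.mpr]
        · simp
        · intro y hy; obtain ⟨z, hz, rfl⟩ := List.mem_map.mp hy; exact (hmema z hz).symm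
      have h2 : (b.map pvRank).count (pvRank x) = 0 := List.count_eq_zero.mpr hxb
      rw [h1, h2]; omega
    have hcr : ∀ r ∈ PySem.List.dedup (b.map pvRank),
        ((x :: rest).map pvRank).count r = (b.map pvRank).count r := by
      intro r hr
      have hrb : r ∈ b.map pvRank := by
        rw [PySem.List.dedup_eq_ofList] at hr; exact (PySem.Set.mem_ofList _ _).mp hr
      obtain ⟨y, hy, rfl⟩ := List.mem_map.mp hrb
      have hne : pvRank y ≠ pvRank x := by have := hmemb y hy; omega
      rw [hrest]
      simp only [List.map_cons, List.map_append, List.count_append, List.count_cons]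
      have h1 : (a.map pvRank).count (pvRank y) = 0 := by
        rw [List.count_eq_zero]
        intro hmem
        obtain ⟨z, hz, hzz⟩ := List.mem_map.mp hmem
        exact hne (by rw [← hzz, hmema z hz])
      rw [h1]
      simp [hne.symm]  -- beq of distinct
    -- assemble
    rw [pvRLE]
    simp only [← hP, ← ha, ← hb]
    rw [hdd]
    rw [List.map_cons]
    congr 1
    · rw [hcx]; simp [pvRank]
    · rw [ih (htail.sublist (List.Sublist.map pvRank (List.dropWhile_sublist P)))]
      apply List.map_congr_left
      intro r hr
      rw [hcr r hr]

lemma pv_getD_append (pre w : List Int) (x d : Int) : (pre ++ x :: w).getD pre.length d = x := by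
  induction pre with
  | nil => rfl
  | cons a pre ih => simpa using ih

lemma pv_erase_append (pre w : List Int) (x : Int) : (pre ++ x :: w).eraseIdx pre.length = pre ++ w := by
  induction pre with
  | nil => rfl
  | cons a pre ih => simpa using ih

lemma pv_moveAux (v m n rest : List Int) (r : Int) (k : Nat)
    (hk : k = m.length + n.length) (h5 : k + v.length = 5) :
    (PySem.List.pyRange (k : Int) 5 1).foldl (fun h j =>
      if PySem.Int.floordiv (ccGet h j) 10 = r then
        (((PySem.List.pop? (PySem.List.insert h 0 (ccGet h j)) (j+1)).map Prod.snd).getD h)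
      else h) (m ++ n ++ (v ++ rest))
    = (v.filter (fun x => decide (pvRank x = r))).reverse ++ m ++ n ++
        (v.filter (fun x => !decide (pvRank x = r)) ++ rest) := by
  induction v generalizing m n k with
  | nil =>
    have : k = 5 := by simpa using h5
    subst this
    rw [PySem.List.pyRange_one_eq_nil (by norm_num)]
    simp
  | cons x v ih =>
    have hklt : k < 5 := by simp at h5; omega
    have hk5 : (k : Int) < 5 := by exact_mod_cast hklt
    have hmn : (m ++ n).length = k := by simp [hk]
    rw [PySem.List.pyRange_one_cons hk5, List.foldl_cons]
    have hsplit : m ++ n ++ (x :: v ++ rest) = (m ++ n) ++ x :: (v ++ rest) := by simp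
    have hget : ccGet (m ++ n ++ (x :: v ++ rest)) (k : Int) = x := by
      simp only [ccGet, PySem.List.pyGetD_natCast]
      rw [hsplit, ← hmn, pv_getD_append]
    by_cases hx : pvRank x = r
    · rw [hget, if_pos (by exact hx)]
      have hins : PySem.List.insert (m ++ n ++ (x :: v ++ rest)) 0 x = x :: (m ++ n ++ (x :: v ++ rest)) :=
        PySem.List.insert_zero _ _
      rw [hins]
      have hlen : k + 1 < (x :: (m ++ n ++ (x :: v ++ rest))).length := by
        simp; omega
      have hcast : (k : Int) + 1 = ((k + 1 : Nat) : Int) := by push_cast; ring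
      rw [hcast, PySem.List.pop?_natCast _ _ hlen]
      simp only [Option.map_some, Option.getD_some]
      have herase : (x :: (m ++ n ++ (x :: v ++ rest))).eraseIdx (k + 1) = x :: ((m ++ n) ++ (v ++ rest)) := by
        rw [List.eraseIdx_cons_succ]
        congr 1
        rw [hsplit, ← hmn, pv_erase_append]
      rw [herase]
      have hre : x :: ((m ++ n) ++ (v ++ rest)) = (x :: m) ++ n ++ (v ++ rest) := by simp
      rw [hre, ih (x :: m) n (k+1) (by simp; omega) (by simp at h5 ⊢; omega)]
      rw [List.filter_cons_of_pos (by simpa using hx)]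
      rw [List.filter_cons_of_neg (by simpa using hx)]
      simp
    · rw [hget, if_neg (by exact hx)]
      have hre : m ++ n ++ (x :: v ++ rest) = m ++ (n ++ [x]) ++ (v ++ rest) := by simp
      have hcast : (k : Int) + 1 = ((k + 1 : Nat) : Int) := by push_cast; ring
      rw [hcast, hre, ih m (n ++ [x]) (k+1) (by simp; omega) (by simp at h5 ⊢; omega)]
      rw [List.filter_cons_of_neg (by simpa using hx)]
      rw [List.filter_cons_of_pos (by simpa using hx)]
      simp

lemma pv_move (u rest : List Int) (r : Int) (hu : u.length = 5) :
    ccMove (u ++ rest) r =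
      (u.filter (fun x => decide (pvRank x = r))).reverse ++
        (u.filter (fun x => !decide (pvRank x = r)) ++ rest) := by
  unfold ccMove
  have h := pv_moveAux u [] [] rest r 0 (by simp) (by simpa using hu)
  simpa using h

lemma pv_filter_u2_ne (u : List Int) (r r' : Int) (hne : r' ≠ r) :
    ((u.filter (fun x => decide (pvRank x = r))).reverse ++ u.filter (fun x => !decide (pvRank x = r))).filter
        (fun x => decide (pvRank x = r')) = u.filter (fun x => decide (pvRank x = r')) := by
  have h1 : ∀ w : List Int, w.filter (fun x => decide (pvRank x = r') && decide (pvRank x = r)) = [] := by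
    intro w
    rw [List.filter_eq_nil_iff]
    intro x _ hx
    simp at hx
    exact hne (hx.1 ▸ hx.2.symm ▸ rfl)
  rw [List.filter_append]
  have h2 : ((u.filter (fun x => decide (pvRank x = r))).reverse).filter (fun x => decide (pvRank x = r')) = [] := by
    rw [List.filter_eq_nil_iff]
    intro x hx hx'
    have hxr : pvRank x = r := by
      have : x ∈ u.filter (fun x => decide (pvRank x = r)) := List.mem_reverse.mp hx
      simpa using List.of_mem_filter this
    simp at hx'
    exact hne (hx' ▸ hxr ▸ rfl)
  rw [h2, List.nil_append, List.filter_filter]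
  apply List.filter_congr
  intro x _
  by_cases hx : pvRank x = r'
  · simp [hx]; exact hne
  · simp [hx]

lemma pv_filter_u2_nin (u : List Int) (r : Int) (rs : List Int) (hr : r ∉ rs) :
    ((u.filter (fun x => decide (pvRank x = r))).reverse ++ u.filter (fun x => !decide (pvRank x = r))).filter
        (fun x => decide (pvRank x ∉ rs)) =
      (u.filter (fun x => decide (pvRank x = r))).reverse ++ u.filter (fun x => decide (pvRank x ∉ r :: rs)) := by
  rw [List.filter_append]
  congr 1
  · apply List.filter_eq_self.mpr
    intro x hx
    have hxr : pvRank x = r := by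
      have : x ∈ u.filter (fun x => decide (pvRank x = r)) := List.mem_reverse.mp hx
      simpa using List.of_mem_filter this
    simp [hxr, hr]
  · rw [List.filter_filter]
    apply List.filter_congr
    intro x _
    by_cases h1 : pvRank x = r
    · simp [h1]
    · by_cases h2 : pvRank x ∈ rs <;> simp [h1, h2]

lemma pv_foldC (rs : List Int) (u rest : List Int) (hnd : rs.Nodup) (hu : u.length = 5) :
    rs.foldl ccMove (u ++ rest) =
      rs.reverse.flatMap (fun r => (u.filter (fun x => decide (pvRank x = r))).reverse) ++
        (u.filter (fun x => decide (pvRank x ∉ rs)) ++ rest) := by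
  induction rs generalizing u with
  | nil => simp
  | cons r rs ih =>
    rw [List.foldl_cons, pv_move u rest r hu]
    have hu2 : ((u.filter (fun x => decide (pvRank x = r))).reverse ++
        u.filter (fun x => !decide (pvRank x = r))).length = 5 := by
      rw [← hu, List.length_append, List.length_reverse]
      have := (List.filter_append_perm (fun x => decide (pvRank x = r)) u).length_eq
      simpa using this
    rw [show (u.filter (fun x => decide (pvRank x = r))).reverse ++
          (u.filter (fun x => !decide (pvRank x = r)) ++ rest) =
        ((u.filter (fun x => decide (pvRank x = r))).reverse ++
          u.filter (fun x => !decide (pvRank x = r))) ++ rest by simp]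
    rw [ih _ (hnd.of_cons) hu2]
    have hr : r ∉ rs := (List.nodup_cons.mp hnd).1
    rw [pv_filter_u2_nin u r rs hr]
    have hflat : rs.reverse.flatMap (fun r' =>
        ((((u.filter (fun x => decide (pvRank x = r))).reverse ++
          u.filter (fun x => !decide (pvRank x = r))).filter (fun x => decide (pvRank x = r'))).reverse)) =
        rs.reverse.flatMap (fun r' => (u.filter (fun x => decide (pvRank x = r'))).reverse) := by
      rw [List.flatMap_def, List.flatMap_def]
      congr 1
      apply List.map_congr_left
      intro r' hr'
      have hne : r' ≠ r := by
        intro h; exact hr (h ▸ (List.mem_reverse.mp hr'))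
      rw [pv_filter_u2_ne u r r' hne]
    rw [hflat]
    rw [show (r :: rs).reverse = rs.reverse ++ [r] by simp]
    rw [List.flatMap_append]
    simp only [List.flatMap_cons, List.flatMap_nil, List.append_nil]
    simp only [List.append_assoc]

lemma pv_permParts (rs : List Int) (u : List Int) (hnd : rs.Nodup) :
    (rs.reverse.flatMap (fun r => (u.filter (fun x => decide (pvRank x = r))).reverse) ++
      u.filter (fun x => decide (pvRank x ∉ rs))).Perm u := by
  induction rs generalizing u with
  | nil => simp
  | cons r rs ih =>
    have hr : r ∉ rs := (List.nodup_cons.mp hnd).1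
    set u' := u.filter (fun x => !decide (pvRank x = r)) with hu'
    have h1 : u'.filter (fun x => decide (pvRank x ∉ rs)) = u.filter (fun x => decide (pvRank x ∉ r :: rs)) := by
      rw [hu', List.filter_filter]
      apply List.filter_congr
      intro x _
      by_cases ha : pvRank x = r
      · simp [ha]
      · by_cases hb : pvRank x ∈ rs <;> simp [ha, hb]
    have h2 : rs.reverse.flatMap (fun r' => (u'.filter (fun x => decide (pvRank x = r'))).reverse) =
        rs.reverse.flatMap (fun r' => (u.filter (fun x => decide (pvRank x = r'))).reverse) := by
      rw [List.flatMap_def, List.flatMap_def]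
      congr 1
      apply List.map_congr_left
      intro r' hr'
      have hne : r' ≠ r := fun h => hr (h ▸ (List.mem_reverse.mp hr'))
      congr 1
      rw [hu', List.filter_filter]
      apply List.filter_congr
      intro x _
      by_cases hx : pvRank x = r'
      · simp [hx]; exact hne
      · simp [hx]
    have ihu := ih u' (hnd.of_cons)
    rw [h1, h2] at ihu
    rw [show (r :: rs).reverse = rs.reverse ++ [r] by simp, List.flatMap_append]
    simp only [List.flatMap_cons, List.flatMap_nil, List.append_nil]
    have hcomm : ∀ (X A Y : List Int), ((X ++ A) ++ Y).Perm (A ++ (X ++ Y)) := by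
      intro X A Y
      have h3 : ((X ++ A) ++ Y).Perm ((A ++ X) ++ Y) := List.perm_append_comm.append_right Y
      simpa [List.append_assoc] using h3
    refine List.Perm.trans ?_ ((List.Perm.append_left _ ihu).trans
      (((List.reverse_perm _).append_right _).trans (List.filter_append_perm _ u)))
    exact hcomm _ _ _

lemma pv_hand (t rest : List Int) (hts : t.Pairwise (· ≤ ·)) (htlen : t.length = 5) :
    (PySem.List.sorted ((PySem.List.dedup (t.map pvRank)).map
        (fun r => ((((t.map pvRank)).count r : Int), r))) (fun p => toLex p) false).foldl
      (fun h g => ccMove h g.2) (t ++ rest)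
      = PySem.List.sorted t (fun c => toLex (((t.map pvRank).count (pvRank c) : Int), c)) true ++ rest := by
  set ranks := t.map pvRank with hranks
  set cnt : Int → Int := fun r => (ranks.count r : Int) with hcnt
  set cfg := (PySem.List.dedup ranks).map (fun r => (cnt r, r)) with hcfg
  set cfg2 := PySem.List.sorted cfg (fun p => toLex p) false with hcfg2
  set key : Int → Lex (Int × Int) := fun c => toLex (cnt (pvRank c), c) with hkey
  set rs := cfg2.map (fun g : Int × Int => g.2) with hrs
  -- basic cfg2 facts
  have hcfg2perm : cfg2.Perm cfg := PySem.List.sorted_perm cfg _ false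
  have hcfgnd : cfg.Nodup := by
    apply List.Nodup.map _ (PySem.List.nodup_dedup ranks)
    intro a b hab
    exact congrArg Prod.snd hab
  have hcfg2nd : cfg2.Nodup := hcfg2perm.nodup_iff.mpr hcfgnd
  have hmemcfg : ∀ g ∈ cfg2, g.1 = cnt g.2 := by
    intro g hg
    have : g ∈ cfg := hcfg2perm.mem_iff.mp hg
    obtain ⟨r, _, rfl⟩ := List.mem_map.mp this
    rfl
  have hpwlt : cfg2.Pairwise (fun g g' => toLex g < toLex g') := by
    have h1 : cfg2.Pairwise (fun g g' => toLex g ≤ toLex g') := PySem.List.sorted_pairwise cfg _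
    have h2 : cfg2.Pairwise (· ≠ ·) := hcfg2nd
    exact (h1.and h2).imp (fun h => lt_of_le_of_ne h.1 (fun he => h.2 (toLex_inj.mp he)))
  have hmapcfg : cfg.map (fun g : Int × Int => g.2) = PySem.List.dedup ranks := by
    rw [hcfg, List.map_map]
    rw [show ((fun g : Int × Int => g.2) ∘ fun r : Int => (cnt r, r)) = id from rfl]
    exact List.map_id _
  have hrsnd : rs.Nodup := by
    rw [hrs]
    refine ((hcfg2perm.map _).nodup_iff).mpr ?_
    rw [hmapcfg]
    exact PySem.List.nodup_dedup ranks
  have hcover : ∀ x ∈ t, pvRank x ∈ rs := by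
    intro x hx
    have h1 : pvRank x ∈ ranks := List.mem_map.mpr ⟨x, hx, rfl⟩
    have h2 : pvRank x ∈ PySem.List.dedup ranks := (PySem.List.mem_dedup _ _).mpr h1
    have h3 : pvRank x ∈ cfg.map (fun g : Int × Int => g.2) := by
      rw [hmapcfg]; exact h2
    exact ((hcfg2perm.map _).mem_iff).mpr h3
  have hres : t.filter (fun x => decide (pvRank x ∉ rs)) = [] := by
    rw [List.filter_eq_nil_iff]
    intro x hx hx'
    simp at hx'
    exact hx' (hcover x hx)
  rw [← List.foldl_map (f := fun g : Int × Int => g.2) (g := ccMove), ← hrs]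
  rw [pv_foldC rs t rest hrsnd htlen, hres, List.nil_append]
  congr 1
  -- the two sides are permutations of t
  have hperm : (rs.reverse.flatMap (fun r => (t.filter (fun x => decide (pvRank x = r))).reverse)).Perm t := by
    have h := pv_permParts rs t hrsnd
    rw [hres, List.append_nil] at h
    exact h
  -- block memberships
  have hblock : ∀ (r : Int) (x : Int), x ∈ (t.filter (fun x => decide (pvRank x = r))).reverse →
      x ∈ t ∧ pvRank x = r := by
    intro r x hx
    have := List.mem_reverse.mp hx
    exact ⟨List.mem_of_mem_filter this, by simpa using List.of_mem_filter this⟩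
  -- Pairwise of the flatMap
  have hpw : (rs.reverse.flatMap (fun r => (t.filter (fun x => decide (pvRank x = r))).reverse)).Pairwise
      (fun a b => key b ≤ key a) := by
    rw [List.flatMap_def, List.pairwise_flatten]
    constructor
    · intro l hl
      obtain ⟨r, _, rfl⟩ := List.mem_map.mp hl
      rw [List.pairwise_reverse]
      have h1 : (t.filter (fun x => decide (pvRank x = r))).Pairwise (· ≤ ·) :=
        hts.sublist List.filter_sublist
      refine h1.imp_of_mem ?_
      intro a b ha hb hab
      have hra : pvRank a = r := by simpa using List.of_mem_filter ha
      have hrb : pvRank b = r := by simpa using List.of_mem_filter hb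
      rw [hkey]
      simp only
      rw [Prod.Lex.toLex_le_toLex]
      right
      exact ⟨by rw [hra, hrb], hab⟩
    · rw [List.pairwise_map, hrs, ← List.map_reverse, List.pairwise_map, List.pairwise_reverse]
      refine hpwlt.imp_of_mem ?_
      intro g g' hg hg' hlt
      intro x hx y hy
      obtain ⟨hxt, hxr⟩ := hblock _ _ hx
      obtain ⟨hyt, hyr⟩ := hblock _ _ hy
      have hgx : cnt (pvRank x) = g'.1 := by rw [hxr, ← hmemcfg g' hg']
      have hgy : cnt (pvRank y) = g.1 := by rw [hyr, ← hmemcfg g hg]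
      rw [hkey]
      simp only
      rw [Prod.Lex.toLex_le_toLex, hgx, hgy]
      rcases Prod.Lex.toLex_lt_toLex.mp hlt with h | ⟨h1, h2⟩
      · left; exact h
      · right
        refine ⟨h1, ?_⟩
        by_contra hxy
        push Not at hxy
        have := pvRank_mono (le_of_lt hxy)
        rw [hxr, hyr] at this
        omega
  -- conclude by uniqueness of the descending arrangement
  refine List.Perm.eq_of_pairwise ?_ hpw (PySem.List.sorted_pairwise_rev t key) ?_
  · intro a b _ _ h1 h2
    have : key a = key b := le_antisymm h2 h1
    rw [hkey] at this
    simpa using congrArg (fun p : Lex (Int × Int) => (ofLex p).2) this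
  · exact hperm.trans (PySem.List.sorted_perm t key true).symm

lemma pv_main (hand : List Int) (h5 : 5 ≤ hand.length) : check_copies hand = check_copies_alt hand := by
  unfold check_copies check_copies_alt
  set s := PySem.List.sorted hand (fun x => x) false with hsdef
  have hslen : 5 ≤ s.length := by rw [hsdef, PySem.List.length_sorted]; exact h5
  have hsort : s.Pairwise (· ≤ ·) := by
    have := PySem.List.sorted_pairwise hand (fun x => x)
    simpa [hsdef] using this
  set t := s.take 5 with htdef
  have htlen : t.length = 5 := by rw [htdef, List.length_take]; omega
  have htsort : t.Pairwise (· ≤ ·) := hsort.sublist (List.take_sublist 5 s)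
  set ranks := t.map pvRank with hranksdef
  have hranksorted : ranks.Pairwise (· ≤ ·) :=
    List.pairwise_map.mpr (htsort.imp (fun h => pvRank_mono h))
  set cfg := (PySem.List.dedup ranks).map (fun r => (((ranks.count r : Int)), r)) with hcfgdef
  -- A's grouping loop computes cfg
  have hA1 : ccOuter s 0 [] 5 = cfg := by
    rw [pv_outer 5 s 0 [] hslen (by omega)]
    simp only [List.drop_zero, List.nil_append, ← htdef]
    rw [pv_rle t hranksorted]
  have hcfgne : cfg ≠ [] := by
    have h0 : t ≠ [] := by
      intro h; rw [h] at htlen; simp at htlen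
    obtain ⟨x, tl, hxt⟩ := List.exists_cons_of_ne_nil h0
    have hmem : pvRank x ∈ PySem.List.dedup ranks :=
      (PySem.List.mem_dedup _ _).mpr (List.mem_map.mpr ⟨x, by rw [hxt]; simp, rfl⟩)
    intro hc
    rw [hcfgdef] at hc
    rw [List.map_eq_nil_iff.mp hc] at hmem
    simp at hmem
  have hpre5 : PySem.List.slice s none (some 5) = t := by
    rw [PySem.List.slice_to s (by norm_num : (0:Int) ≤ 5)]; rfl
  have hdrop5 : PySem.List.slice s (some 5) none = s.drop 5 := by
    rw [PySem.List.slice_from s (by norm_num : (0:Int) ≤ 5)]; rfl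
  have hmapt : (PySem.List.pyRange 0 5 1).map (fun j => PySem.List.pyGetD s j 0) = t := by
    rcases s with _ | ⟨a, s1⟩; · simp at hslen
    rcases s1 with _ | ⟨b, s2⟩; · simp at hslen
    rcases s2 with _ | ⟨c, s3⟩; · simp at hslen
    rcases s3 with _ | ⟨d, s4⟩; · simp at hslen
    rcases s4 with _ | ⟨e, s5⟩; · simp at hslen
    rw [htdef, show PySem.List.pyRange 0 5 1 = [0, 1, 2, 3, 4] by decide]
    simp [PySem.List.pyGetD_ofNat']
  have hcounts : (PySem.List.pyRange 0 5 1).foldl (fun d j =>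
      PySem.Dict.insert d (PySem.Int.floordiv (PySem.List.pyGetD s j 0) 10)
        (PySem.Dict.getD d (PySem.Int.floordiv (PySem.List.pyGetD s j 0) 10) 0 + 1))
      PySem.Dict.empty = PySem.Dict.counter ranks := by
    rw [← List.foldl_map (f := fun j => PySem.List.pyGetD s j 0)
      (g := fun d c => PySem.Dict.insert d (PySem.Int.floordiv c 10)
        (PySem.Dict.getD d (PySem.Int.floordiv c 10) 0 + 1))]
    rw [hmapt, hranksdef, ← PySem.Dict.foldl_insert_getD_add_one_eq_counter, List.foldl_map]
    rfl
  have hitems : (PySem.Dict.counter ranks).items.map (fun rc : Int × Int => (rc.2, rc.1)) = cfg := by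
    rw [PySem.Dict.items_counter, List.map_map, hcfgdef, PySem.List.dedup_eq_ofList]
    rfl
  have hkeyfun : (fun c : Int => toLex (PySem.Dict.getD (PySem.Dict.counter ranks) (PySem.Int.floordiv c 10) 0, c))
      = fun c : Int => toLex (((ranks.count (pvRank c) : Int)), c) := by
    funext c
    rw [PySem.Dict.getD_counter]
    rfl
  have hinit : s = t ++ s.drop 5 := (List.take_append_drop 5 s).symm
  have hhand : (PySem.List.sorted cfg (fun p => toLex p) false).foldl (fun h g => ccMove h g.2) s
      = PySem.List.sorted t (fun c : Int => toLex (((ranks.count (pvRank c) : Int)), c)) true ++ s.drop 5 := by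
    conv_lhs => rw [hinit]
    rw [hcfgdef, hranksdef]
    exact pv_hand t (s.drop 5) htsort htlen
  simp only [hA1, hpre5, hdrop5, hcounts, hitems, hkeyfun, if_pos hcfgne, hhand]

-- ===== VERDICT (by name: the statement is the Claim_ definition above) =====
theorem check_copies_spec : Claim_equal_check_copies := by
  intro hand _ hpre
  unfold Spec_check_copies
  exact pv_main hand hpre.1
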